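-- pv_equiv track=rewrite | github.com/F4bb3rs/SiPro | main.py | computeKeyPairs
-- ===== SOURCE A (Python) =====
-- def computeKeyPairs(char_list):
--     output = []
--     for i in char_list:
--         char_clone = char_list[:] # Kopiere Variable, nicht nur Referenz
--         char_clone.remove(i)
--         for j in char_clone:
--             output.append((i, j))
--     return output
-- ===== SOURCE B (Python) =====
-- def computeKeyPairs(char_list):
--     first = {}
--     for k, v in enumerate(char_list):
--         if v not in first:
--             first[v] = k
--     return [(i, j)
--             for i in char_list
--             for k, j in enumerate(char_list)
--             if k != first[i]]
-- ===== Notes on version B (the rewrite author's own statement) =====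
-- stated objective: alternative
-- what changed: B builds a first-occurrence-index dict in one pass and emits pairs in a single flat comprehension that skips index first[i], instead of copying the whole list and running remove's linear scan for every i.
import Mathlib
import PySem

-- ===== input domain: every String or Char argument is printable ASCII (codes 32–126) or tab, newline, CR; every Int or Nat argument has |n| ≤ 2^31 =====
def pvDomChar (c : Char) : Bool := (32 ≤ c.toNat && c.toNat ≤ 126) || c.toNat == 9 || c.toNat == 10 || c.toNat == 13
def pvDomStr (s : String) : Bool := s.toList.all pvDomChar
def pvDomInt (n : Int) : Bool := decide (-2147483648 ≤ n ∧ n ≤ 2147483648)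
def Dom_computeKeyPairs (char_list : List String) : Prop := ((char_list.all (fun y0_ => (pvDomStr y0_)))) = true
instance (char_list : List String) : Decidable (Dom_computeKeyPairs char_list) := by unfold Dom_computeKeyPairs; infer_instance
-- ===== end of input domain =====

-- B replaces A's per-element list copy + remove scan by a first-occurrence-index dict built once
-- and a single flat comprehension that skips that index (alternative algorithm, same cost).

-- ===== PORT A =====
-- for i in char_list: char_clone = char_list[:]; char_clone.remove(i); for j in char_clone: output.append((i, j))
def computeKeyPairs (char_list : List String) : List (String × String) :=
  char_list.foldl (fun output i =>
    match PySem.List.remove? char_list i with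
    | some char_clone => char_clone.foldl (fun output j => output ++ [(i, j)]) output
    | none => output  -- unreachable: i ∈ char_list, so remove never raises
    ) []

-- ===== PORT B =====
-- first = {}; for k, v in enumerate(char_list): if v not in first: first[v] = k
def pvFirstIdx (char_list : List String) : PySem.Dict String Int :=
  (PySem.List.enumerate char_list 0).foldl
    (fun first kv => if first.contains kv.2 then first else first.insert kv.2 kv.1)
    PySem.Dict.empty

-- [(i, j) for i in char_list for k, j in enumerate(char_list) if k != first[i]]
-- first.getD i 0: i ∈ char_list, so the key is always present (Python's first[i] cannot raise)
def computeKeyPairs_alt (char_list : List String) : List (String × String) :=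
  char_list.flatMap (fun i =>
    (PySem.List.enumerate char_list 0).filterMap (fun kv =>
      if kv.1 ≠ (pvFirstIdx char_list).getD i 0 then some (i, kv.2) else none))

-- ===== PRECONDITION & SPEC =====
def Spec_computeKeyPairs (char_list : List String) (out : List (String × String)) : Prop := out = computeKeyPairs_alt char_list
instance (char_list : List String) (out : List (String × String)) : Decidable (Spec_computeKeyPairs char_list out) := by unfold Spec_computeKeyPairs; infer_instance

-- ===== CLAIM (what is proved, stated in full; the proofs are below) =====
def Claim_equal_computeKeyPairs : Prop := ∀ (char_list : List String), Dom_computeKeyPairs char_list → Spec_computeKeyPairs char_list (computeKeyPairs char_list)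

-- ===== LEMMAS AND PROOFS =====

-- the first-occurrence dict: lookup is the first index of v in the remaining list (offset s), unless already recorded
theorem pvFirstIdx_get (cl : List String) (s : Int) (d : PySem.Dict String Int) (v : String) :
    ((PySem.List.enumerate cl s).foldl
      (fun first kv => if first.contains kv.2 then first else first.insert kv.2 kv.1) d).get? v =
    if d.contains v then d.get? v
    else (PySem.List.index? cl v).map (fun k => s + (k : Int)) := by
  induction cl generalizing s d with
  | nil =>
    simp only [PySem.List.enumerate_nil, List.foldl_nil]
    by_cases hv : d.contains v
    · rw [if_pos hv]
    · rw [if_neg hv, (PySem.Dict.get?_eq_none_iff_contains d v).mpr (by simpa using hv)]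
      simp [PySem.List.index?_eq_idxOf?]
  | cons x xs ih =>
    rw [PySem.List.enumerate_cons]
    simp only [List.foldl_cons]
    by_cases hxv : x = v
    · subst hxv
      rw [PySem.List.index?_cons_self]
      by_cases hc : d.contains x
      · rw [if_pos hc, ih]
        simp [hc]
      · rw [if_neg hc, ih, if_pos (PySem.Dict.contains_insert_self d x s),
          PySem.Dict.get?_insert_self, if_neg hc]
        simp
    · rw [PySem.List.index?_cons_of_ne xs hxv]
      by_cases hc : d.contains x
      · rw [if_pos hc, ih]
        by_cases hv : d.contains v
        · simp [hv]
        · rw [if_neg hv, if_neg hv]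
          cases PySem.List.index? xs v with
          | none => simp
          | some k =>
            simp
            ring
      · rw [if_neg hc, ih]
        have hci : (d.insert x s).contains v = d.contains v := by
          rw [PySem.Dict.contains_insert]
          simp [beq_iff_eq, Ne.symm hxv]
        rw [hci, PySem.Dict.get?_insert_of_ne d s (Ne.symm hxv)]
        by_cases hv : d.contains v
        · simp [hv]
        · rw [if_neg hv, if_neg hv]
          cases PySem.List.index? xs v with
          | none => simp
          | some k =>
            simp
            ring

-- once the cutoff index is already strictly below the running start, nothing more is skipped
theorem filterMap_keep_all (i : String) (cl : List String) (s c : Int) (h : c < s) :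
    (PySem.List.enumerate cl s).filterMap
      (fun kv => if kv.1 ≠ c then some (i, kv.2) else none) = cl.map (fun j => (i, j)) := by
  induction cl generalizing s with
  | nil => simp [PySem.List.enumerate_nil]
  | cons x xs ih =>
    rw [PySem.List.enumerate_cons]
    simp only [List.filterMap_cons, List.map_cons]
    rw [if_pos (by omega : s ≠ c), ih (s + 1) (by omega)]

-- skipping exactly the first-occurrence index reproduces Python's value-based remove (= erase)
theorem filterMap_skip_eq_erase (i : String) (cl : List String) (s : Int) (k : Nat)
    (hk : PySem.List.index? cl i = some k) :
    (PySem.List.enumerate cl s).filterMap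
      (fun kv => if kv.1 ≠ s + (k : Int) then some (i, kv.2) else none) =
    (cl.erase i).map (fun j => (i, j)) := by
  induction cl generalizing s k with
  | nil => simp [PySem.List.index?_eq_none_iff] at hk
  | cons x xs ih =>
    rw [PySem.List.enumerate_cons]
    simp only [List.filterMap_cons]
    by_cases hxi : x = i
    · subst hxi
      rw [PySem.List.index?_cons_self] at hk
      cases hk
      simp only [Nat.cast_zero, add_zero]
      rw [if_neg (by omega : ¬ s ≠ s), List.erase_cons_head]
      exact filterMap_keep_all x xs (s + 1) s (by omega)
    · rw [PySem.List.index?_cons_of_ne xs hxi] at hk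
      cases hidx : PySem.List.index? xs i with
      | none => rw [hidx] at hk; simp at hk
      | some k' =>
        rw [hidx] at hk
        simp only [Option.map_some, Option.some.injEq] at hk
        subst hk
        rw [if_pos (by push_cast; omega : s ≠ s + ((k' + 1 : Nat) : Int))]
        rw [List.erase_cons_tail (by simp [hxi])]
        simp only [List.map_cons, List.cons.injEq, true_and]
        rw [← ih (s + 1) k' hidx]
        apply List.filterMap_congr
        intro kv _
        simp only [Nat.cast_add, Nat.cast_one,
          show s + ((k' : Int) + 1) = s + 1 + (k' : Int) from by ring]

-- pointwise: for i ∈ cl, A's inner loop body equals B's inner comprehension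
theorem inner_eq (cl : List String) (i : String) (hi : i ∈ cl) (out : List (String × String)) :
    (match PySem.List.remove? cl i with
     | some char_clone => char_clone.foldl (fun output j => output ++ [(i, j)]) out
     | none => out) =
    out ++ (PySem.List.enumerate cl 0).filterMap
      (fun kv => if kv.1 ≠ (pvFirstIdx cl).getD i 0 then some (i, kv.2) else none) := by
  rw [PySem.List.remove?_eq_some_erase cl i hi]
  show (cl.erase i).foldl (fun output j => output ++ [(i, j)]) out = _
  rw [PySem.List.foldl_append_singleton_eq_map]
  congr 1
  cases hidx : PySem.List.index? cl i with
  | none => exact absurd hi ((PySem.List.index?_eq_none_iff cl i).mp hidx)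
  | some k =>
    have hget : (pvFirstIdx cl).getD i 0 = (k : Int) := by
      rw [PySem.Dict.getD_eq_get?_getD]
      unfold pvFirstIdx
      rw [pvFirstIdx_get cl 0 PySem.Dict.empty i]
      rw [PySem.List.index?_eq_idxOf?] at hidx
      simp [PySem.List.index?_eq_idxOf?, hidx]
    rw [hget, ← filterMap_skip_eq_erase i cl 0 k hidx]
    apply List.filterMap_congr
    intro kv _
    simp

-- ===== VERDICT (by name: the statement is the Claim_ definition above) =====
theorem computeKeyPairs_spec : Claim_equal_computeKeyPairs := by
  intro cl _
  unfold Spec_computeKeyPairs computeKeyPairs computeKeyPairs_alt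
  rw [PySem.List.foldl_congr_mem' cl _
    (fun output i => output ++ (PySem.List.enumerate cl 0).filterMap
      (fun kv => if kv.1 ≠ (pvFirstIdx cl).getD i 0 then some (i, kv.2) else none)) []
    (fun i hi out => inner_eq cl i hi out)]
  rw [PySem.List.foldl_append_eq_flatMap]
  simp
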